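-- pv_equiv track=rewrite | github.com/cheon4050/CodingTest-Study | 27주차/택배상자/chuheeseung_택배상자.py | solution
-- ===== SOURCE A (Python) =====
-- from collections import deque
--
-- def solution(order):
--     n = len(order)
--     main = deque([num for num in range(1, n + 1)]) # 메인 컨베이어 벨트, 큐
--     sub = [] # 보조 컨베이어 벨트, 스택
--     answer = 0 # 실을 수 있는 상자 개수
--
--     for i, box in enumerate(order):
--         if sub and sub[-1] == box: # 보조 컨베이어 벨트가 존재하고, 보조 컨베이어 벨트 마지막이 박스랑 같은 경우
--             sub.pop() # 컨베이어 벨트에서 박스를 꺼낸다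
--             answer += 1
--         else: # 보조 컨베이어 벨트에 박스가 없거나 마지막이 박스랑 다른 경우
--             if not main: # 메인 컨베이어 벨트에 박스가 없으면 패스
--                 break
--
--             while main:
--                 b = main.popleft() # 메인 벨트에서는 앞에서 박스를 내릴 수 있다 -> popleft()
--                 if b == box: # b랑 박스랑 같으면 택배 실을 수 있다
--                     answer += 1
--                     break
--                 else: # b랑 박스랑 다르면 b를 보조 컨베이어 벨트로 보낸다
--                     sub.append(b)
--
--     return answer
-- ===== SOURCE B (Python) =====
-- def solution(order):
--     n = len(order)
--     ivs = []   # run-length sub belt: stack of intervals (lo, hi) = boxes lo..hi, top at end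
--     cur = 1    # next box still on the main belt (main belt = cur..n)
--     answer = 0
--     for box in order:
--         if ivs and ivs[-1][1] == box:
--             lo, hi = ivs.pop()
--             if lo < hi:
--                 ivs.append((lo, hi - 1))
--             answer += 1
--         elif cur > n:
--             break
--         elif cur <= box <= n:
--             if cur < box:
--                 ivs.append((cur, box - 1))
--             answer += 1
--             cur = box + 1
--         else:
--             ivs.append((cur, n))
--             cur = n + 1
--     return answer
-- ===== Notes on version B (the rewrite author's own statement) =====
-- stated objective: faster
-- what changed: Replaces A's materialized 1..n deque, element-by-element sub stack and inner popleft while-loop by a run-length representation: an arithmetic belt pointer and a stack of (lo,hi) intervals, doing O(1) work and moving no individual boxes per order item.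
import Mathlib
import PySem

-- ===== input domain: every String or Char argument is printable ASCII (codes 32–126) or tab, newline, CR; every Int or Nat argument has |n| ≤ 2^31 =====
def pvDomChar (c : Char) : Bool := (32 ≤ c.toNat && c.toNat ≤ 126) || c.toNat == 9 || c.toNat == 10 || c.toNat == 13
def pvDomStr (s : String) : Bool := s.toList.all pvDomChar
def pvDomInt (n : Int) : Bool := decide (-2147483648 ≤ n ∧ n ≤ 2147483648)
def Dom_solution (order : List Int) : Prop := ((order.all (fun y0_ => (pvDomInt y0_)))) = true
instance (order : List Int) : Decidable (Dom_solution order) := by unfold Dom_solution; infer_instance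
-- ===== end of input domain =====

-- B replaces A's materialized 1..n deque, per-element sub stack and inner popleft loop by a
-- belt pointer plus a run-length stack of (lo,hi) intervals; return values are proved equal.

-- ===== PORT A =====
-- Python stacks/deques are represented head-first: sub[-1] / main.popleft() is the list head.
-- inner 'while main:' loop: pop b from the front; stop with True on b == box, else push b onto sub
def solInner (box : Int) : List Int → List Int → (List Int × List Int × Bool)
  | [], sub => ([], sub, false)
  | b :: m, sub => if b = box then (m, sub, true) else solInner box m (b :: sub)

-- outer 'for i, box in enumerate(order):' loop over (main, sub, answer)
def solLoopA : List Int → List Int → List Int → Int → Int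
  | [], _, _, answer => answer
  | box :: rest, main, sub, answer =>
    if sub.head? = some box then
      solLoopA rest main sub.tail (answer + 1)
    else if main = [] then answer
    else
      let r := solInner box main sub
      solLoopA rest r.1 r.2.1 (if r.2.2 then answer + 1 else answer)

def solution (order : List Int) : Int :=
  solLoopA order (PySem.List.pyRange 1 ((order.length : Int) + 1) 1) [] 0

-- ===== PORT B =====
-- 'lo, hi = ivs.pop(); if lo < hi: ivs.append((lo, hi - 1))' — shrink the top interval
def popTop : List (Int × Int) → List (Int × Int)
  | [] => []
  | (lo, hi) :: t => if lo < hi then (lo, hi - 1) :: t else t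

-- Source B's for loop over (cur, ivs, answer); interval stack is head-first (ivs[-1] = head)
def solLoopB (n : Int) : List Int → Int → List (Int × Int) → Int → Int
  | [], _, _, answer => answer
  | box :: rest, cur, ivs, answer =>
    if ivs.head?.map Prod.snd = some box then
      solLoopB n rest cur (popTop ivs) (answer + 1)
    else if cur > n then answer
    else if cur ≤ box ∧ box ≤ n then
      solLoopB n rest (box + 1) (if cur < box then (cur, box - 1) :: ivs else ivs) (answer + 1)
    else
      solLoopB n rest (n + 1) ((cur, n) :: ivs) answer

def solution_alt (order : List Int) : Int :=
  solLoopB (order.length : Int) order 1 [] 0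

-- ===== PRECONDITION & SPEC =====
def Spec_solution (order : List Int) (out : Int) : Prop := out = solution_alt order
instance (order : List Int) (out : Int) : Decidable (Spec_solution order out) := by unfold Spec_solution; infer_instance

-- ===== CLAIM (what is proved, stated in full; the proofs are below) =====
def Claim_equal_solution : Prop := ∀ (order : List Int), Dom_solution order → Spec_solution order (solution order)

-- ===== LEMMAS AND PROOFS =====

-- flatten B's run-length intervals to A's element stack (head = top)
def flat : List (Int × Int) → List Int
  | [] => []
  | (lo, hi) :: t => (PySem.List.pyRange lo (hi + 1) 1).reverse ++ flat t

theorem rev_range_cons {lo hi : Int} (h : lo ≤ hi) :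
    (PySem.List.pyRange lo (hi + 1) 1).reverse = hi :: (PySem.List.pyRange lo hi 1).reverse := by
  rw [PySem.List.pyRange_one_succ_right h]; simp

-- A's inner while loop over the main belt cur..n in closed form
theorem solInner_range (box n : Int) : ∀ (cur : Int) (sub : List Int), cur ≤ n →
    solInner box (PySem.List.pyRange cur (n + 1) 1) sub =
      if cur ≤ box ∧ box ≤ n then
        (PySem.List.pyRange (box + 1) (n + 1) 1, (PySem.List.pyRange cur box 1).reverse ++ sub, true)
      else
        ([], (PySem.List.pyRange cur (n + 1) 1).reverse ++ sub, false) := by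
  intro cur sub h
  by_cases hk : (n - cur).toNat = 0
  · have hcn : cur = n := by omega
    subst hcn
    rw [PySem.List.pyRange_one_cons (by omega : cur < cur + 1)]
    simp only [solInner]
    by_cases hb : cur = box
    · subst hb
      simp [PySem.List.pyRange_one_eq_nil (le_refl cur),
        PySem.List.pyRange_one_eq_nil (le_refl (cur + 1))]
    · rw [if_neg hb, PySem.List.pyRange_one_eq_nil (le_refl (cur + 1))]
      simp only [solInner]
      rw [if_neg (by omega : ¬(cur ≤ box ∧ box ≤ cur))]
      simp
  · rw [PySem.List.pyRange_one_cons (by omega : cur < n + 1)]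
    simp only [solInner]
    by_cases hb : cur = box
    · subst hb
      rw [if_pos rfl, if_pos ⟨le_refl cur, by omega⟩,
        PySem.List.pyRange_one_eq_nil (le_refl cur)]
      simp
    · rw [if_neg hb,
        solInner_range box n (cur + 1) (cur :: sub) (by omega)]
      by_cases hc : cur + 1 ≤ box ∧ box ≤ n
      · rw [if_pos hc, if_pos (by omega : cur ≤ box ∧ box ≤ n),
          PySem.List.pyRange_one_cons (show cur < box by omega)]
        simp
      · rw [if_neg hc, if_neg (by omega : ¬(cur ≤ box ∧ box ≤ n))]
        simp
termination_by cur _ _ => (n - cur).toNat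
decreasing_by omega

-- invariant: A's (main, sub) = (pyRange cur (n+1), flat ivs) with every interval nonempty
theorem loopA_eq_loopB (n : Int) : ∀ (order : List Int) (cur : Int) (ivs : List (Int × Int)) (ans : Int),
    cur ≤ n + 1 → (∀ p ∈ ivs, p.1 ≤ p.2) →
    solLoopA order (PySem.List.pyRange cur (n + 1) 1) (flat ivs) ans = solLoopB n order cur ivs ans := by
  intro order
  induction order with
  | nil => intro cur ivs ans _ _; simp [solLoopA, solLoopB]
  | cons box rest ih =>
    intro cur ivs ans hcur hwf
    simp only [solLoopA, solLoopB]
    have hhead : (flat ivs).head? = ivs.head?.map Prod.snd := by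
      match ivs, hwf with
      | [], _ => simp [flat]
      | (lo, hi) :: t, hwf =>
        have : lo ≤ hi := hwf (lo, hi) (by simp)
        simp [flat, rev_range_cons this]
    rw [hhead]
    by_cases hh : ivs.head?.map Prod.snd = some box
    · rw [if_pos hh, if_pos hh]
      match ivs, hwf, hh with
      | (lo, hi) :: t, hwf, hh =>
        have hlh : lo ≤ hi := hwf (lo, hi) (by simp)
        have hwt : ∀ p ∈ t, p.1 ≤ p.2 := fun p hp => hwf p (by simp [hp])
        have htail : (flat ((lo, hi) :: t)).tail = flat (popTop ((lo, hi) :: t)) := by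
          simp only [flat, rev_range_cons hlh, popTop]
          by_cases hlt : lo < hi
          · rw [if_pos hlt]; simp [flat]
          · have : lo = hi := by omega
            subst this
            rw [if_neg hlt]
            simp [PySem.List.pyRange_one_eq_nil (le_refl lo)]
        rw [htail, ih cur (popTop ((lo, hi) :: t)) (ans + 1) hcur]
        intro p hp
        simp only [popTop] at hp
        by_cases hlt : lo < hi
        · rw [if_pos hlt] at hp
          rcases List.mem_cons.mp hp with h1 | h2
          · subst h1; simp; omega
          · exact hwt p h2
        · rw [if_neg hlt] at hp; exact hwt p hp
    · rw [if_neg hh, if_neg hh]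
      by_cases hc : cur > n
      · have : cur = n + 1 := by omega
        subst this
        rw [PySem.List.pyRange_one_eq_nil (le_refl (n + 1))]
        simp
      · have hne : PySem.List.pyRange cur (n + 1) 1 ≠ [] := by
          rw [PySem.List.pyRange_one_cons (by omega)]; simp
        rw [if_neg hne, if_neg hc]
        rw [solInner_range box n cur (flat ivs) (by omega)]
        by_cases hb : cur ≤ box ∧ box ≤ n
        · rw [if_pos hb, if_pos hb]
          simp only []
          have hpush : (PySem.List.pyRange cur box 1).reverse ++ flat ivs =
              flat (if cur < box then (cur, box - 1) :: ivs else ivs) := by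
            by_cases hlt : cur < box
            · rw [if_pos hlt]
              simp only [flat]
              rw [show box - 1 + 1 = box by ring]
            · rw [if_neg hlt,
                PySem.List.pyRange_one_eq_nil (by omega : box ≤ cur)]
              simp
          rw [hpush]
          have := ih (box + 1) (if cur < box then (cur, box - 1) :: ivs else ivs) (ans + 1)
            (by omega)
            (by intro p hp
                by_cases hlt : cur < box
                · rw [if_pos hlt] at hp
                  rcases List.mem_cons.mp hp with h1 | h2
                  · subst h1; simp; omega
                  · exact hwf p h2
                · rw [if_neg hlt] at hp; exact hwf p hp)
          simpa using this
        · rw [if_neg hb, if_neg hb]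
          simp only []
          have hpush : (PySem.List.pyRange cur (n + 1) 1).reverse ++ flat ivs = flat ((cur, n) :: ivs) := by
            simp [flat]
          rw [hpush]
          have h0 : PySem.List.pyRange (n + 1) (n + 1) 1 = [] :=
            PySem.List.pyRange_one_eq_nil (le_refl (n + 1))
          have := ih (n + 1) ((cur, n) :: ivs) ans (by omega)
            (by intro p hp
                rcases List.mem_cons.mp hp with h1 | h2
                · subst h1; simp; omega
                · exact hwf p h2)
          simpa [h0] using this

-- ===== VERDICT (by name: the statement is the Claim_ definition above) =====
theorem solution_spec : Claim_equal_solution := by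
  intro order _
  unfold Spec_solution solution solution_alt
  exact loopA_eq_loopB (order.length : Int) order 1 [] 0 (by omega) (by simp)
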